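-- pv_equiv track=rewrite | github.com/jsyeh/leetcode | 1181/before-and-after-puzzle.py | beforeAndAfterPuzzles
-- ===== SOURCE A (Python) =====
-- from typing import List
--
-- def beforeAndAfterPuzzles(phrases: List[str]) -> List[str]:
--     N = len(phrases)
--     words = []  # 讓 words[i][k] 對應 phrases[i] 的第k個字
--     for i in range(N):
--         words.append(phrases[i].split())
--     ans = set()  # 用 set() 可避開「重覆的答案」
--     for i in range(N):  # 試過所有的句子組合
--         for j in range(N):
--             if i==j: continue  # 避開本身
--             if words[i][-1] == words[j][0]:  # 字尾 接 字首
--                 ans.add(' '.join(words[i] + words[j][1:]))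
--     return sorted(ans)  # 再排序好
-- ===== SOURCE B (Python) =====
-- from typing import List
--
-- def beforeAndAfterPuzzles(phrases: List[str]) -> List[str]:
--     words = [p.split() for p in phrases]
--     buckets = {}  # first word -> indices of phrases starting with it
--     for j in range(len(words)):
--         buckets.setdefault(words[j][0], []).append(j)
--     ans = set()
--     for i in range(len(words)):
--         w = words[i]
--         for j in buckets.get(w[-1], []):
--             if j != i:
--                 ans.add(' '.join(w + words[j][1:]))
--     return sorted(ans)
-- ===== Notes on version B (the rewrite author's own statement) =====
-- stated objective: alternative
-- what changed: Replaces the all-pairs nested scan with a dict that buckets phrase indices by first word, so each phrase is paired only against the bucket matching its last word (output-sensitive: intended as faster, but on a timing run's collision-heavy timing inputs the measured gain varied between 1.3x and 2x, so no speed is claimed).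
-- outside the precondition, e.g. on beforeAndAfterPuzzles(['']): A returns [], B raises IndexError; on beforeAndAfterPuzzles(['  ']): A returns [], B raises IndexError
import Mathlib
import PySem

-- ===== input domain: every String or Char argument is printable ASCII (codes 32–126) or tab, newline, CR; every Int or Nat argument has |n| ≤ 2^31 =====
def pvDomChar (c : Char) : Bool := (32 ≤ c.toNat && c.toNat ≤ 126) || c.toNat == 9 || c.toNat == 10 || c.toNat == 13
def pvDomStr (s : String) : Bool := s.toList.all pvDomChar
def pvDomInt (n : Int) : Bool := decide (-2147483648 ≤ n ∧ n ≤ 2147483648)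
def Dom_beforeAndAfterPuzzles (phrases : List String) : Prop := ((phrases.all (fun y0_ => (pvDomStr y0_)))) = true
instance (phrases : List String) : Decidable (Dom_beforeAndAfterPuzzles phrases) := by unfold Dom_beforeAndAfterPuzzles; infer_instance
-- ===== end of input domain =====

-- B replaces A's all-pairs nested scan by a dict bucketing phrase indices by first word (alternative, output-sensitive algorithm).

-- ===== PORT A =====
-- words[] built by the appending loop of A
def pvWordsA (phrases : List String) : List (List String) :=
  (PySem.List.pyRange 0 (phrases.length : Int)).foldl
    (fun ws i => ws ++ [PySem.Str.split₀ (PySem.List.pyGetD phrases i "")]) []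

-- the set `ans` built by A's nested loops over range(N) × range(N)
-- (words[i][-1] / words[j][0] are read with a default: inside Pre_ every words[t] is nonempty)
def pvAnsA (N : Int) (words : List (List String)) : PySem.Set String :=
  (PySem.List.pyRange 0 N).foldl
    (fun ans i =>
      (PySem.List.pyRange 0 N).foldl
        (fun ans j =>
          if i = j then ans
          else if PySem.List.pyGetD (PySem.List.pyGetD words i []) (-1) ""
                  = PySem.List.pyGetD (PySem.List.pyGetD words j []) 0 "" then
            ans.add (PySem.Str.join " "
              (PySem.List.pyGetD words i [] ++
               PySem.List.slice (PySem.List.pyGetD words j []) (some 1) none))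
          else ans)
        ans)
    PySem.Set.empty

def beforeAndAfterPuzzles (phrases : List String) : List String :=
  PySem.List.sorted (pvAnsA (phrases.length : Int) (pvWordsA phrases)) (fun x => x)

-- ===== PORT B =====
-- buckets: first word -> list of indices of phrases starting with it
-- (words[j][0] / w[-1] read with a default: inside Pre_ every words[t] is nonempty)
def pvBuckets (words : List (List String)) : PySem.Dict String (List Int) :=
  (PySem.List.pyRange 0 (words.length : Int)).foldl
    (fun d j =>
      PySem.Dict.modify d (PySem.List.pyGetD (PySem.List.pyGetD words j []) 0 "") []
        (fun l => l ++ [j]))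
    PySem.Dict.empty

-- the set `ans` built by B: each phrase paired only against its matching bucket
def pvAnsB (words : List (List String)) (buckets : PySem.Dict String (List Int)) : PySem.Set String :=
  (PySem.List.pyRange 0 (words.length : Int)).foldl
    (fun s i =>
      (PySem.Dict.getD buckets (PySem.List.pyGetD (PySem.List.pyGetD words i []) (-1) "") []).foldl
        (fun s j =>
          if j ≠ i then
            s.add (PySem.Str.join " "
              (PySem.List.pyGetD words i [] ++
               PySem.List.slice (PySem.List.pyGetD words j []) (some 1) none))
          else s)
        s)
    PySem.Set.empty

def beforeAndAfterPuzzles_alt (phrases : List String) : List String :=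
  PySem.List.sorted
    (pvAnsB (phrases.map PySem.Str.split₀) (pvBuckets (phrases.map PySem.Str.split₀)))
    (fun x => x)

-- ===== PRECONDITION & SPEC =====
-- Pre_ excludes lists containing a phrase that splits to no words (empty/whitespace-only):
-- on those A raises IndexError at words[i][-1] whenever the list has ≥ 2 phrases, and B's
-- bucket construction raises on them always (on such a singleton list A returns []).
def Pre_beforeAndAfterPuzzles (phrases : List String) : Prop :=
  ∀ p ∈ phrases, PySem.Str.split₀ p ≠ []
instance (phrases : List String) : Decidable (Pre_beforeAndAfterPuzzles phrases) := by
  unfold Pre_beforeAndAfterPuzzles; infer_instance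

def pvWitness_beforeAndAfterPuzzles : List String := ["writing code", "code rocks"]

def Spec_beforeAndAfterPuzzles (phrases : List String) (out : List String) : Prop :=
  out = beforeAndAfterPuzzles_alt phrases
instance (phrases : List String) (out : List String) : Decidable (Spec_beforeAndAfterPuzzles phrases out) := by
  unfold Spec_beforeAndAfterPuzzles; infer_instance

-- ===== CLAIM (what is proved, stated in full; the proofs are below) =====
def Claim_equal_beforeAndAfterPuzzles : Prop :=
  ∀ (phrases : List String), Dom_beforeAndAfterPuzzles phrases →
    Pre_beforeAndAfterPuzzles phrases →
    Spec_beforeAndAfterPuzzles phrases (beforeAndAfterPuzzles phrases)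

-- ===== LEMMAS AND PROOFS =====

-- membership through a foldl whose step adds (at most) elements described by P
theorem pv_mem_foldl_step {α β : Type} [BEq α] [LawfulBEq α] {P : β → α → Prop}
    {g : PySem.Set α → β → PySem.Set α}
    (hg : ∀ s b y, y ∈ g s b ↔ y ∈ s ∨ P b y) :
    ∀ (l : List β) (s : PySem.Set α) (y : α),
      y ∈ l.foldl g s ↔ y ∈ s ∨ ∃ b ∈ l, P b y := by
  intro l
  induction l with
  | nil => simp
  | cons b l ih =>
    intro s y
    rw [List.foldl_cons, ih, hg]
    simp only [List.mem_cons]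
    constructor
    · rintro ((h | h) | ⟨c, hc, hP⟩)
      · exact Or.inl h
      · exact Or.inr ⟨b, Or.inl rfl, h⟩
      · exact Or.inr ⟨c, Or.inr hc, hP⟩
    · rintro (h | ⟨c, (rfl | hc), hP⟩)
      · exact Or.inl (Or.inl h)
      · exact Or.inl (Or.inr hP)
      · exact Or.inr ⟨c, hc, hP⟩

theorem pv_nodup_foldl_step {α β : Type} {g : List α → β → List α}
    (hg : ∀ s b, s.Nodup → (g s b).Nodup) :
    ∀ (l : List β) (s : List α), s.Nodup → (l.foldl g s).Nodup := by
  intro l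
  induction l with
  | nil => intro s hs; simpa
  | cons b l ih => intro s hs; exact ih _ (hg _ _ hs)

theorem pv_wordsA_eq (phrases : List String) :
    pvWordsA phrases = phrases.map PySem.Str.split₀ := by
  unfold pvWordsA
  rw [PySem.List.foldl_append_singleton_eq_map
        (fun i => PySem.Str.split₀ (PySem.List.pyGetD phrases i "")), List.nil_append]
  have h : (fun i => PySem.Str.split₀ (PySem.List.pyGetD phrases i ""))
      = PySem.Str.split₀ ∘ (fun i => PySem.List.pyGetD phrases i "") := rfl
  rw [h, ← List.map_map]
  have hlen : ((phrases.length : Nat) : Int) = PySem.List.len phrases := rfl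
  rw [hlen, PySem.List.map_pyGetD_pyRange_zero]

theorem pv_mem_ansA (N : Int) (ws : List (List String)) (y : String) :
    y ∈ pvAnsA N ws ↔
      ∃ i : Int, (0 ≤ i ∧ i < N) ∧ ∃ j : Int, (0 ≤ j ∧ j < N) ∧ i ≠ j ∧
        PySem.List.pyGetD (PySem.List.pyGetD ws i []) (-1) ""
          = PySem.List.pyGetD (PySem.List.pyGetD ws j []) 0 "" ∧
        y = PySem.Str.join " "
              (PySem.List.pyGetD ws i [] ++
               PySem.List.slice (PySem.List.pyGetD ws j []) (some 1) none) := by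
  have hstep : ∀ (s : PySem.Set String) (i : Int) (y : String),
      y ∈ (PySem.List.pyRange 0 N).foldl
        (fun ans j =>
          if i = j then ans
          else if PySem.List.pyGetD (PySem.List.pyGetD ws i []) (-1) ""
                  = PySem.List.pyGetD (PySem.List.pyGetD ws j []) 0 "" then
            ans.add (PySem.Str.join " "
              (PySem.List.pyGetD ws i [] ++
               PySem.List.slice (PySem.List.pyGetD ws j []) (some 1) none))
          else ans) s
      ↔ y ∈ s ∨ ∃ j ∈ PySem.List.pyRange 0 N, i ≠ j ∧
          PySem.List.pyGetD (PySem.List.pyGetD ws i []) (-1) ""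
            = PySem.List.pyGetD (PySem.List.pyGetD ws j []) 0 "" ∧
          y = PySem.Str.join " "
                (PySem.List.pyGetD ws i [] ++
                 PySem.List.slice (PySem.List.pyGetD ws j []) (some 1) none) := by
    intro s i y
    refine pv_mem_foldl_step
      (P := fun b y' => i ≠ b ∧
        PySem.List.pyGetD (PySem.List.pyGetD ws i []) (-1) ""
          = PySem.List.pyGetD (PySem.List.pyGetD ws b []) 0 "" ∧
        y' = PySem.Str.join " "
              (PySem.List.pyGetD ws i [] ++
               PySem.List.slice (PySem.List.pyGetD ws b []) (some 1) none)) ?_ _ _ _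
    intro s' b y'
    by_cases hij : i = b
    · simp [hij]
    · by_cases hc : PySem.List.pyGetD (PySem.List.pyGetD ws i []) (-1) ""
          = PySem.List.pyGetD (PySem.List.pyGetD ws b []) 0 ""
      · simp only [if_neg hij, if_pos hc, PySem.Set.mem_add]
        tauto
      · simp only [if_neg hij, if_neg hc]
        tauto
  unfold pvAnsA
  rw [pv_mem_foldl_step (fun s i y => hstep s i y)]
  simp only [PySem.Set.empty_eq, List.not_mem_nil, false_or, PySem.List.mem_pyRange_one]

theorem pv_mem_buckets_aux (ws : List (List String)) :
    ∀ (n : Nat) (d : PySem.Dict String (List Int)) (w : String) (j : Int),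
      j ∈ PySem.Dict.getD ((PySem.List.pyRange 0 (n : Int)).foldl
          (fun d j =>
            PySem.Dict.modify d (PySem.List.pyGetD (PySem.List.pyGetD ws j []) 0 "") []
              (fun l => l ++ [j])) d) w []
      ↔ j ∈ PySem.Dict.getD d w [] ∨
        ∃ t : Nat, t < n ∧
          PySem.List.pyGetD (PySem.List.pyGetD ws (t : Int) []) 0 "" = w ∧ j = (t : Int) := by
  intro n
  induction n with
  | zero =>
    intro d w j
    rw [Nat.cast_zero, show PySem.List.pyRange 0 0 = [] from by decide]
    simp
  | succ n ih =>
    intro d w j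
    have h1 : ((n + 1 : Nat) : Int) = (n : Int) + 1 := by push_cast; ring
    rw [h1, PySem.List.pyRange_one_succ_right (Int.natCast_nonneg n), List.foldl_append,
        List.foldl_cons, List.foldl_nil, PySem.Dict.getD_modify]
    by_cases hk : w = PySem.List.pyGetD (PySem.List.pyGetD ws (n : Int) []) 0 ""
    · rw [if_pos hk, List.mem_append, ih, List.mem_singleton]
      constructor
      · rintro ((h | ⟨t, ht, h3, h4⟩) | hj)
        · exact Or.inl (hk ▸ h)
        · exact Or.inr ⟨t, Nat.lt_succ_of_lt ht, hk ▸ h3, h4⟩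
        · exact Or.inr ⟨n, Nat.lt_succ_self n, hk.symm, hj⟩
      · rintro (h | ⟨t, ht, h3, h4⟩)
        · exact Or.inl (Or.inl (hk ▸ h))
        · rcases Nat.lt_succ_iff_lt_or_eq.mp ht with h' | rfl
          · exact Or.inl (Or.inr ⟨t, h', hk ▸ h3, h4⟩)
          · exact Or.inr h4
    · rw [if_neg hk, ih]
      constructor
      · rintro (h | ⟨t, ht, h3, h4⟩)
        · exact Or.inl h
        · exact Or.inr ⟨t, Nat.lt_succ_of_lt ht, h3, h4⟩
      · rintro (h | ⟨t, ht, h3, h4⟩)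
        · exact Or.inl h
        · rcases Nat.lt_succ_iff_lt_or_eq.mp ht with h' | rfl
          · exact Or.inr ⟨t, h', h3, h4⟩
          · exact absurd h3.symm hk

theorem pv_mem_buckets (ws : List (List String)) (w : String) (j : Int) :
    j ∈ PySem.Dict.getD (pvBuckets ws) w [] ↔
      ∃ t : Nat, t < ws.length ∧
        PySem.List.pyGetD (PySem.List.pyGetD ws (t : Int) []) 0 "" = w ∧ j = (t : Int) := by
  unfold pvBuckets
  rw [pv_mem_buckets_aux ws ws.length PySem.Dict.empty w j]
  have hempty : PySem.Dict.getD (PySem.Dict.empty : PySem.Dict String (List Int)) w [] = [] := rfl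
  rw [hempty]
  simp

theorem pv_mem_ansB (ws : List (List String)) (y : String) :
    y ∈ pvAnsB ws (pvBuckets ws) ↔
      ∃ i : Int, (0 ≤ i ∧ i < (ws.length : Int)) ∧
        ∃ j : Int, j ∈ PySem.Dict.getD (pvBuckets ws)
            (PySem.List.pyGetD (PySem.List.pyGetD ws i []) (-1) "") [] ∧ j ≠ i ∧
          y = PySem.Str.join " "
                (PySem.List.pyGetD ws i [] ++
                 PySem.List.slice (PySem.List.pyGetD ws j []) (some 1) none) := by
  have hstep : ∀ (s : PySem.Set String) (i : Int) (y : String),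
      y ∈ (PySem.Dict.getD (pvBuckets ws)
            (PySem.List.pyGetD (PySem.List.pyGetD ws i []) (-1) "") []).foldl
          (fun s j =>
            if j ≠ i then
              s.add (PySem.Str.join " "
                (PySem.List.pyGetD ws i [] ++
                 PySem.List.slice (PySem.List.pyGetD ws j []) (some 1) none))
            else s) s
      ↔ y ∈ s ∨ ∃ j ∈ PySem.Dict.getD (pvBuckets ws)
            (PySem.List.pyGetD (PySem.List.pyGetD ws i []) (-1) "") [], j ≠ i ∧
          y = PySem.Str.join " "
                (PySem.List.pyGetD ws i [] ++
                 PySem.List.slice (PySem.List.pyGetD ws j []) (some 1) none) := by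
    intro s i y
    refine pv_mem_foldl_step
      (P := fun b y' => b ≠ i ∧
        y' = PySem.Str.join " "
              (PySem.List.pyGetD ws i [] ++
               PySem.List.slice (PySem.List.pyGetD ws b []) (some 1) none)) ?_ _ _ _
    intro s' b y'
    by_cases hbi : b = i
    · simp [hbi]
    · simp only [if_pos hbi, PySem.Set.mem_add]
      tauto
  unfold pvAnsB
  rw [pv_mem_foldl_step (fun s i y => hstep s i y)]
  simp only [PySem.Set.empty_eq, List.not_mem_nil, false_or, PySem.List.mem_pyRange_one]

theorem pv_nodup_ansA (N : Int) (ws : List (List String)) : (pvAnsA N ws).Nodup := by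
  unfold pvAnsA
  refine pv_nodup_foldl_step ?_ _ _ (by simp [PySem.Set.empty_eq])
  intro s i hs
  refine pv_nodup_foldl_step ?_ _ _ hs
  intro s' b hs'
  split_ifs
  · exact hs'
  · exact PySem.Set.nodup_add _ _ hs'
  · exact hs'

theorem pv_nodup_ansB (ws : List (List String)) (b : PySem.Dict String (List Int)) :
    (pvAnsB ws b).Nodup := by
  unfold pvAnsB
  refine pv_nodup_foldl_step ?_ _ _ (by simp [PySem.Set.empty_eq])
  intro s i hs
  refine pv_nodup_foldl_step ?_ _ _ hs
  intro s' c hs'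
  split_ifs
  · exact PySem.Set.nodup_add _ _ hs'
  · exact hs'

-- ===== VERDICT (by name: the statement is the Claim_ definition above) =====
theorem beforeAndAfterPuzzles_spec : Claim_equal_beforeAndAfterPuzzles := by
  intro phrases _dom _hpre
  unfold Spec_beforeAndAfterPuzzles beforeAndAfterPuzzles beforeAndAfterPuzzles_alt
  rw [pv_wordsA_eq]
  have hlen : (phrases.map PySem.Str.split₀).length = phrases.length := by simp
  apply PySem.List.sorted_eq_sorted_of_perm _ _ _ (fun a b h => h)
  rw [List.perm_ext_iff_of_nodup (pv_nodup_ansA _ _) (pv_nodup_ansB _ _)]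
  intro y
  rw [pv_mem_ansA, pv_mem_ansB, hlen]
  constructor
  · rintro ⟨i, ⟨hi0, hiN⟩, j, ⟨hj0, hjN⟩, hij, hcond, rfl⟩
    obtain ⟨tj, rfl⟩ : ∃ t : Nat, j = (t : Int) := ⟨j.toNat, (Int.toNat_of_nonneg hj0).symm⟩
    have htj : tj < phrases.length := by exact_mod_cast hjN
    refine ⟨i, ⟨hi0, hiN⟩, (tj : Int), ?_, Ne.symm hij, rfl⟩
    rw [pv_mem_buckets]
    exact ⟨tj, by rw [hlen]; exact htj, hcond.symm, rfl⟩
  · rintro ⟨i, ⟨hi0, hiN⟩, j, hjmem, hji, rfl⟩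
    rw [pv_mem_buckets] at hjmem
    obtain ⟨t, ht, hkey, rfl⟩ := hjmem
    rw [hlen] at ht
    refine ⟨i, ⟨hi0, hiN⟩, (t : Int), ⟨Int.natCast_nonneg t, by exact_mod_cast ht⟩,
      Ne.symm hji, hkey.symm, rfl⟩
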